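-- pv_equiv track=rewrite | github.com/anishbhaswanth/varcal | src/varcall.py | get_base_counts
-- ===== SOURCE A (Python) =====
-- import operator
--
-- def get_base_counts(alt_seq, ref_nucl):
--     counts = {'A': 0, 'T': 0, 'G': 0, 'C': 0}
--     for nucl in alt_seq:
--         if not nucl == 'N':
--             counts[nucl] += 1
--
--     max_nucl_counts = max(counts.items(), key=operator.itemgetter(1))
--     if max_nucl_counts[0] == ref_nucl:
--         # delete this base to look for next best one
--         del(counts[max_nucl_counts[0]])
--         new_max_nucl_counts = max(counts.items(), key=operator.itemgetter(1))
--         if new_max_nucl_counts[1] == 0: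
--             return (ref_nucl, 0)
--         else:
--             return (new_max_nucl_counts)
--     else:
--         return max_nucl_counts
-- ===== SOURCE B (Python) =====
-- def get_base_counts(alt_seq, ref_nucl):
--     counts = {'A': 0, 'T': 0, 'G': 0, 'C': 0}
--     for nucl in alt_seq:
--         if not nucl == 'N':
--             counts[nucl] += 1
--     # single pass over the four (base, count) items, tracking the top two (first wins ties)
--     top = ('', -1)
--     second = ('', -1)
--     for p in counts.items():
--         if p[1] > top[1]:
--             top, second = p, top
--         elif p[1] > second[1]:
--             second = p
--     if top[0] != ref_nucl:
--         return top
--     return (ref_nucl, 0) if second[1] == 0 else second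
-- ===== Notes on version B (the rewrite author's own statement) =====
-- stated objective: alternative
-- what changed: Keeps the counting loop but replaces A's two-stage max/delete-key/max selection by a single top-two tracking pass over the four (base,count) items.
import Mathlib
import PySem

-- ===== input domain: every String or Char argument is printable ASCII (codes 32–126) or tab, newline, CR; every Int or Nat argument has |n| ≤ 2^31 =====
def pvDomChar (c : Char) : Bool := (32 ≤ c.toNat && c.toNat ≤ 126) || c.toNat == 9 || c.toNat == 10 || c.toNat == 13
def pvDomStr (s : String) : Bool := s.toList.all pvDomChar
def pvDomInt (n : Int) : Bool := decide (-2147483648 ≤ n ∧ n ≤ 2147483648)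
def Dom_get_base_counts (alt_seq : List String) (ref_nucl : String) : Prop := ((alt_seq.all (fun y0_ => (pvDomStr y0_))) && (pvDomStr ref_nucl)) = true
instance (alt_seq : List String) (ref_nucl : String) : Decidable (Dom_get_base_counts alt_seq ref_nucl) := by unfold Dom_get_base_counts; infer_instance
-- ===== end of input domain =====

-- ===== PORT A =====
-- B keeps A's counting loop but replaces the two-stage max/delete-key/max selection by a single
-- top-two tracking pass over the items (alternative decomposition, similar cost).
-- Port of A: dict of four counts, max of the items by value, delete-and-max-again when the best base
-- is the reference.  (Python's max over the nonempty dict always returns; the `.getD` defaults are unreachable.)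
def get_base_counts (alt_seq : List String) (ref_nucl : String) : String × Int :=
  let counts := alt_seq.foldl
    (fun d nucl => if !(nucl == "N") then d.insert nucl (d.getD nucl 0 + 1) else d)
    (PySem.Dict.ofList [("A", 0), ("T", 0), ("G", 0), ("C", 0)])
  let m := (PySem.List.max? counts.items (fun kv => kv.2)).getD ("", 0)
  if m.1 == ref_nucl then
    let m2 := (PySem.List.max? ((counts.erase m.1).items) (fun kv => kv.2)).getD (ref_nucl, 0)
    if m2.2 == 0 then (ref_nucl, 0) else m2
  else m

-- ===== PORT B =====
-- Port of B: the same counting dict, then ONE pass over its items tracking the top two (first wins ties).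
def get_base_counts_alt (alt_seq : List String) (ref_nucl : String) : String × Int :=
  let counts := alt_seq.foldl
    (fun d nucl => if !(nucl == "N") then d.insert nucl (d.getD nucl 0 + 1) else d)
    (PySem.Dict.ofList [("A", 0), ("T", 0), ("G", 0), ("C", 0)])
  let ts := counts.items.foldl
    (fun (ts : (String × Int) × (String × Int)) p =>
      if p.2 > ts.1.2 then (p, ts.1)
      else if p.2 > ts.2.2 then (ts.1, p) else ts)
    (("", -1), ("", -1))
  if ts.1.1 != ref_nucl then ts.1
  else if ts.2.2 == 0 then (ref_nucl, 0)
  else ts.2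

-- ===== PRECONDITION & SPEC =====
-- Pre_ excludes sequences containing a string other than "A"/"T"/"G"/"C"/"N": on those Python A raises KeyError.
def Pre_get_base_counts (alt_seq : List String) (ref_nucl : String) : Prop :=
  ∀ s ∈ alt_seq, s = "A" ∨ s = "T" ∨ s = "G" ∨ s = "C" ∨ s = "N"
instance (alt_seq : List String) (ref_nucl : String) : Decidable (Pre_get_base_counts alt_seq ref_nucl) := by unfold Pre_get_base_counts; infer_instance

def pvWitness_get_base_counts : List String × String := (["A", "T", "T", "N"], "T")

def Spec_get_base_counts (alt_seq : List String) (ref_nucl : String) (out : String × Int) : Prop := out = get_base_counts_alt alt_seq ref_nucl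
instance (alt_seq : List String) (ref_nucl : String) (out : String × Int) : Decidable (Spec_get_base_counts alt_seq ref_nucl out) := by unfold Spec_get_base_counts; infer_instance

-- ===== CLAIM (what is proved, stated in full; the proofs are below) =====
def Claim_equal_get_base_counts : Prop := ∀ (alt_seq : List String) (ref_nucl : String), Dom_get_base_counts alt_seq ref_nucl → Pre_get_base_counts alt_seq ref_nucl → Spec_get_base_counts alt_seq ref_nucl (get_base_counts alt_seq ref_nucl)


-- ===== LEMMAS AND PROOFS =====

-- A's counting loop, on a sequence of A/T/G/C/N only, adds the plain occurrence counts in place.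
lemma fold_counts (l : List String)
    (h : ∀ s ∈ l, s = "A" ∨ s = "T" ∨ s = "G" ∨ s = "C" ∨ s = "N")
    (a t g c : Int) :
    l.foldl (fun d nucl => if !(nucl == "N") then d.insert nucl (d.getD nucl 0 + 1) else d)
      (PySem.Dict.mk [("A", a), ("T", t), ("G", g), ("C", c)]) =
      PySem.Dict.mk [("A", a + l.count "A"), ("T", t + l.count "T"),
                     ("G", g + l.count "G"), ("C", c + l.count "C")] := by
  induction l generalizing a t g c with
  | nil => simp
  | cons x xs ih =>
    have hxs : ∀ s ∈ xs, s = "A" ∨ s = "T" ∨ s = "G" ∨ s = "C" ∨ s = "N" :=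
      fun s hs => h s (List.mem_cons_of_mem _ hs)
    rw [List.foldl_cons]
    rcases h x List.mem_cons_self with rfl | rfl | rfl | rfl | rfl
    · have hs : (if !("A" == "N") then (PySem.Dict.mk [("A", a), ("T", t), ("G", g), ("C", c)]).insert "A" ((PySem.Dict.mk [("A", a), ("T", t), ("G", g), ("C", c)]).getD "A" 0 + 1) else (PySem.Dict.mk [("A", a), ("T", t), ("G", g), ("C", c)])) = PySem.Dict.mk [("A", a + 1), ("T", t), ("G", g), ("C", c)] := by
        simp [PySem.Dict.insert, PySem.Dict.getD, PySem.Dict.get?, PySem.Dict.contains]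
      rw [hs, ih hxs]; simp [List.count_cons]; ring
    · have hs : (if !("T" == "N") then (PySem.Dict.mk [("A", a), ("T", t), ("G", g), ("C", c)]).insert "T" ((PySem.Dict.mk [("A", a), ("T", t), ("G", g), ("C", c)]).getD "T" 0 + 1) else (PySem.Dict.mk [("A", a), ("T", t), ("G", g), ("C", c)])) = PySem.Dict.mk [("A", a), ("T", t + 1), ("G", g), ("C", c)] := by
        simp [PySem.Dict.insert, PySem.Dict.getD, PySem.Dict.get?, PySem.Dict.contains]
      rw [hs, ih hxs]; simp [List.count_cons]; ring
    · have hs : (if !("G" == "N") then (PySem.Dict.mk [("A", a), ("T", t), ("G", g), ("C", c)]).insert "G" ((PySem.Dict.mk [("A", a), ("T", t), ("G", g), ("C", c)]).getD "G" 0 + 1) else (PySem.Dict.mk [("A", a), ("T", t), ("G", g), ("C", c)])) = PySem.Dict.mk [("A", a), ("T", t), ("G", g + 1), ("C", c)] := by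
        simp [PySem.Dict.insert, PySem.Dict.getD, PySem.Dict.get?, PySem.Dict.contains]
      rw [hs, ih hxs]; simp [List.count_cons]; ring
    · have hs : (if !("C" == "N") then (PySem.Dict.mk [("A", a), ("T", t), ("G", g), ("C", c)]).insert "C" ((PySem.Dict.mk [("A", a), ("T", t), ("G", g), ("C", c)]).getD "C" 0 + 1) else (PySem.Dict.mk [("A", a), ("T", t), ("G", g), ("C", c)])) = PySem.Dict.mk [("A", a), ("T", t), ("G", g), ("C", c + 1)] := by
        simp [PySem.Dict.insert, PySem.Dict.getD, PySem.Dict.get?, PySem.Dict.contains]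
      rw [hs, ih hxs]; simp [List.count_cons]; ring
    · have hs : (if !("N" == "N") then (PySem.Dict.mk [("A", a), ("T", t), ("G", g), ("C", c)]).insert "N" ((PySem.Dict.mk [("A", a), ("T", t), ("G", g), ("C", c)]).getD "N" 0 + 1) else (PySem.Dict.mk [("A", a), ("T", t), ("G", g), ("C", c)])) = PySem.Dict.mk [("A", a), ("T", t), ("G", g), ("C", c)] := by
        simp
      rw [hs, ih hxs]; simp [List.count_cons]

-- Both selection procedures pick the same pair from the four (base, count) items.
set_option maxHeartbeats 4000000 in
lemma core (a t g c : Int) (ha : 0 ≤ a) (ht : 0 ≤ t) (hg : 0 ≤ g) (hc : 0 ≤ c) (ref : String) :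
    (let m := (PySem.List.max? ((PySem.Dict.mk [("A", a), ("T", t), ("G", g), ("C", c)]).items) (fun kv => kv.2)).getD ("", 0)
     if m.1 == ref then
       let m2 := (PySem.List.max? (((PySem.Dict.mk [("A", a), ("T", t), ("G", g), ("C", c)]).erase m.1).items) (fun kv => kv.2)).getD (ref, 0)
       if m2.2 == 0 then (ref, 0) else m2
     else m)
    = (let ts := [("A", a), ("T", t), ("G", g), ("C", c)].foldl
        (fun (ts : (String × Int) × (String × Int)) p =>
          if p.2 > ts.1.2 then (p, ts.1)
          else if p.2 > ts.2.2 then (ts.1, p) else ts)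
        (("", -1), ("", -1))
       if ts.1.1 != ref then ts.1
       else if ts.2.2 == 0 then (ref, 0)
       else ts.2) := by
  have ha' : (-1:Int) < a := by omega
  have ht' : (-1:Int) < t := by omega
  have hg' : (-1:Int) < g := by omega
  have hc' : (-1:Int) < c := by omega
  simp only [PySem.List.max?, List.foldl, gt_iff_lt]
  simp [ha', ht', hg', hc', PySem.Dict.erase, List.filter, bne, beq_iff_eq]
  rcases Decidable.em (a < t) with h1 | h1 <;> (try simp [h1]) <;>
  rcases Decidable.em (a < g) with h2 | h2 <;> (try simp [h2]) <;>
  rcases Decidable.em (a < c) with h3 | h3 <;> (try simp [h3]) <;>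
  rcases Decidable.em (t < g) with h4 | h4 <;> (try simp [h4]) <;>
  rcases Decidable.em (t < c) with h5 | h5 <;> (try simp [h5]) <;>
  rcases Decidable.em (g < c) with h6 | h6 <;> (try simp [h6]) <;>
  by_cases hrA : "A" = ref <;> (try simp [hrA]) <;> (try simp [(show (("A":String) == ref) = true by simp [hrA])]) <;> (try simp [(show (("A":String) == ref) = false by simp [hrA])]) <;>
  by_cases hrT : "T" = ref <;> (try simp [hrT]) <;> (try simp [(show (("T":String) == ref) = true by simp [hrT])]) <;> (try simp [(show (("T":String) == ref) = false by simp [hrT])]) <;>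
  by_cases hrG : "G" = ref <;> (try simp [hrG]) <;> (try simp [(show (("G":String) == ref) = true by simp [hrG])]) <;> (try simp [(show (("G":String) == ref) = false by simp [hrG])]) <;>
  by_cases hrC : "C" = ref <;> (try simp [hrC]) <;> (try simp [(show (("C":String) == ref) = true by simp [hrC])]) <;> (try simp [(show (("C":String) == ref) = false by simp [hrC])]) <;>
  (try simp [h1]) <;>
  (try simp [h2]) <;>
  (try simp [h3]) <;>
  (try simp [h4]) <;>
  (try simp [h5]) <;>
  (try simp [h6]) <;>
    first
      | exact absurd (hrA.trans hrT.symm) (by decide)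
      | exact absurd (hrA.trans hrG.symm) (by decide)
      | exact absurd (hrA.trans hrC.symm) (by decide)
      | exact absurd (hrT.trans hrG.symm) (by decide)
      | exact absurd (hrT.trans hrC.symm) (by decide)
      | exact absurd (hrG.trans hrC.symm) (by decide)
      | rfl
      | omega
      | (split_ifs <;> simp_all <;> omega)
      | (exfalso; simp_all)

-- ===== VERDICT (by name: the statement is the Claim_ definition above) =====
theorem get_base_counts_spec : Claim_equal_get_base_counts := by
  intro alt_seq ref_nucl _hdom hpre
  unfold Spec_get_base_counts get_base_counts get_base_counts_alt
  rw [show PySem.Dict.ofList [("A", (0:Int)), ("T", 0), ("G", 0), ("C", 0)] = PySem.Dict.mk [("A", 0), ("T", 0), ("G", 0), ("C", 0)] from rfl,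
      fold_counts alt_seq hpre 0 0 0 0]
  simp only [zero_add]
  exact core _ _ _ _ (Int.natCast_nonneg _) (Int.natCast_nonneg _) (Int.natCast_nonneg _) (Int.natCast_nonneg _) ref_nucl
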